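-- pv_equiv track=rewrite | github.com/TheOstrichIO/ostrichlib | ostrich/utils/path.py | posix_commonpath
-- ===== SOURCE A (Python) =====
-- from builtins import bytes, str  # from "future" library
--
-- def check_arg_types(funcname, *args):
--     """Raise TypeError if not all items of `args` are same string type."""
--     hasstr = hasbytes = False
--     for arg in args:
--         if isinstance(arg, str):
--             hasstr = True
--         elif isinstance(arg, bytes):
--             hasbytes = True
--         else:
--             raise TypeError('{0}() argument must be str or bytes, not {1}'
--                             .format(funcname, arg.__class__.__name__))
--     if hasstr and hasbytes:
--         raise TypeError("Can't mix strings and bytes in path components")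
--
-- def posix_commonpath(paths):
--     """Given a sequence of POSIX path names,
--        return the longest common sub-path."""
--
--     if not paths:
--         raise ValueError('commonpath() arg is an empty sequence')
--
--     check_arg_types('commonpath', *paths)
--
--     if isinstance(paths[0], bytes):
--         sep = b'/'
--         curdir = b'.'
--     else:
--         sep = '/'
--         curdir = '.'
--
--     split_paths = [path.split(sep) for path in paths]
--
--     try:
--         isabs, = set(p[:1] == sep for p in paths)
--     except ValueError:
--         raise ValueError("Can't mix absolute and relative paths")
--
--     split_paths = [[c for c in s if c and c != curdir] for s in split_paths]
--     s_min = min(split_paths)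
--     s_max = max(split_paths)
--     common = s_min
--     for i, run_c in enumerate(s_min):
--         if run_c != s_max[i]:
--             common = s_min[:i]
--             break
--
--     prefix = sep if isabs else sep[:0]
--     return prefix + sep.join(common)
-- ===== SOURCE B (Python) =====
-- def posix_commonpath(paths):
--     """Given a sequence of POSIX path names,
--        return the longest common sub-path."""
--
--     if not paths:
--         raise ValueError('commonpath() arg is an empty sequence')
--
--     for p in paths:
--         if not isinstance(p, (str, bytes)):
--             raise TypeError('commonpath() argument must be str or bytes, '
--                             'not {0}'.format(p.__class__.__name__))
--
--     if isinstance(paths[0], bytes):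
--         sep, curdir = b'/', b'.'
--     else:
--         sep, curdir = '/', '.'
--
--     isabs = paths[0].startswith(sep)
--     if any(p.startswith(sep) != isabs for p in paths):
--         raise ValueError("Can't mix absolute and relative paths")
--
--     split_paths = [[c for c in p.split(sep) if c and c != curdir]
--                    for p in paths]
--
--     # peel equal leading components column by column across ALL paths
--     first, rest = split_paths[0], split_paths[1:]
--     common = []
--     for c in first:
--         if all(s[:1] == [c] for s in rest):
--             common.append(c)
--             rest = [s[1:] for s in rest]
--         else:
--             break
--
--     prefix = sep if isabs else sep[:0]
--     return prefix + sep.join(common)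
-- ===== Notes on version B (the rewrite author's own statement) =====
-- stated objective: alternative
-- what changed: Replaces A's lexicographic min/max extremes plus single-index walk over s_min by a direct column-wise peel: the common prefix is built by comparing each leading component across ALL split paths and stopping at the first column that differs.
import Mathlib
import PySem

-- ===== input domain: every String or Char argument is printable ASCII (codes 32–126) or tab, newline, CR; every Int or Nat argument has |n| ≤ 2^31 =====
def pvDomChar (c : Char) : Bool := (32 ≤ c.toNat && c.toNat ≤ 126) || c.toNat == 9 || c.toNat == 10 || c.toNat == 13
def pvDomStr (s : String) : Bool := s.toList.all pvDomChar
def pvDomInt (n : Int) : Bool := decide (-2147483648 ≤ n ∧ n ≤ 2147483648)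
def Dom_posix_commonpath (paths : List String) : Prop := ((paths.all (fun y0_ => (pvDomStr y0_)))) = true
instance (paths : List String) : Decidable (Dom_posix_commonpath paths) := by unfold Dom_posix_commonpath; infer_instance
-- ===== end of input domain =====

-- B replaces A's lexicographic min/max extremes + single-index walk by a column-wise peel
-- of the shared leading components across ALL split paths (alternative decomposition, same cost).

-- ===== PORT A =====
-- A's loop 'common = s_min; for i, run_c in enumerate(s_min): if run_c != s_max[i]: common = s_min[:i]; break'
def pvGoA (smin smax : List String) : List (Int × String) → List String
  | [] => smin
  | (i, c) :: t =>
    if c ≠ PySem.List.pyGetD smax i "" then PySem.List.slice smin none (some i)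
    else pvGoA smin smax t

def posix_commonpath (paths : List String) : String :=
  if paths = [] then ""   -- ValueError('commonpath() arg is an empty sequence'): excluded by Pre_
  else
    let sep := "/"
    let curdir := "."
    let split_paths := paths.map (fun p => (PySem.Str.split? p sep).getD [])
    match PySem.Set.ofList (paths.map (fun p => PySem.Str.slice p none (some 1) == sep)) with
    | [isabs] =>
      let split_paths := split_paths.map (fun s => s.filter (fun c => !(c == "") && !(c == curdir)))
      -- min(split_paths) / max(split_paths): Python's lexicographic list order; the LinearOrder
      -- instance is pinned so the PySem order lemmas apply (it is the same lexicographic order)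
      match @PySem.List.min? _ _ List.instLinearOrder.toLT LinearOrder.toDecidableLT split_paths (fun x => x),
            @PySem.List.max? _ _ List.instLinearOrder.toLT LinearOrder.toDecidableLT split_paths (fun x => x) with
      | some s_min, some s_max =>
        let common := pvGoA s_min s_max (PySem.List.enumerate s_min 0)
        (if isabs then sep else "") ++ PySem.Str.join sep common
      | _, _ => ""   -- unreachable: split_paths is nonempty
    | _ => ""   -- ValueError("Can't mix absolute and relative paths"): excluded by Pre_

-- ===== PORT B =====
-- B's loop: peel the shared leading component across all remaining tails, break at the first mismatch
def pvGoB : List String → List (List String) → List String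
  | [], _ => []
  | c :: t, rest =>
    if rest.all (fun s => PySem.List.slice s none (some 1) == [c]) then
      c :: pvGoB t (rest.map (fun s => PySem.List.slice s (some 1) none))
    else []

def posix_commonpath_alt (paths : List String) : String :=
  match paths with
  | [] => ""   -- ValueError: excluded by Pre_
  | p0 :: _ =>
    let isabs := PySem.Str.startswith p0 "/"
    if paths.any (fun p => PySem.Str.startswith p "/" != isabs) then ""  -- ValueError: excluded by Pre_
    else
      match paths.map (fun p => ((PySem.Str.split? p "/").getD []).filter
              (fun c => !(c == "") && !(c == "."))) with
      | [] => ""   -- unreachable: paths is nonempty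
      | first :: rest =>
        (if isabs then "/" else "") ++ PySem.Str.join "/" (pvGoB first rest)

-- ===== PRECONDITION & SPEC =====
-- Pre_ excludes exactly the inputs where A raises ValueError: the empty sequence and mixed absolute/relative paths.
def Pre_posix_commonpath (paths : List String) : Prop :=
  paths ≠ [] ∧ ((∀ p ∈ paths, PySem.Str.startswith p "/" = true) ∨ (∀ p ∈ paths, PySem.Str.startswith p "/" = false))
instance (paths : List String) : Decidable (Pre_posix_commonpath paths) := by
  unfold Pre_posix_commonpath; infer_instance

def pvWitness_posix_commonpath : List String := ["/usr/lib/a", "/usr/local", "/usr/lib"]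

def Spec_posix_commonpath (paths : List String) (out : String) : Prop := out = posix_commonpath_alt paths
instance (paths : List String) (out : String) : Decidable (Spec_posix_commonpath paths out) := by unfold Spec_posix_commonpath; infer_instance

-- ===== CLAIM (what is proved, stated in full; the proofs are below) =====
def Claim_equal_posix_commonpath : Prop := ∀ (paths : List String), Dom_posix_commonpath paths → Pre_posix_commonpath paths → Spec_posix_commonpath paths (posix_commonpath paths)

-- ===== LEMMAS AND PROOFS =====

-- longest common prefix of two lists (proof-side characterisation of A's loop)
def pvLcp : List String → List String → List String
  | a :: as, b :: bs => if a = b then a :: pvLcp as bs else []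
  | _, _ => []

theorem pvLcp_prefix_left : ∀ (a b : List String), pvLcp a b <+: a := by
  intro a
  induction a with
  | nil => intro b; cases b <;> simp [pvLcp]
  | cons x as ih =>
    intro b
    cases b with
    | nil => simp [pvLcp]
    | cons y bs =>
      simp only [pvLcp]
      split
      · simpa [List.cons_prefix_cons] using ih bs
      · simp

theorem pvLcp_prefix_right : ∀ (a b : List String), pvLcp a b <+: b := by
  intro a
  induction a with
  | nil => intro b; cases b <;> simp [pvLcp]
  | cons x as ih =>
    intro b
    cases b with
    | nil => simp [pvLcp]
    | cons y bs =>
      simp only [pvLcp]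
      split
      · rename_i h; subst h; simpa [List.cons_prefix_cons] using ih bs
      · simp

theorem prefix_pvLcp : ∀ (p a b : List String), p <+: a → p <+: b → p <+: pvLcp a b := by
  intro p
  induction p with
  | nil => simp
  | cons x ps ih =>
    intro a b ha hb
    cases a with
    | nil => simp at ha
    | cons y as =>
      cases b with
      | nil => simp at hb
      | cons z bs =>
        rw [List.cons_prefix_cons] at ha hb
        obtain ⟨rfl, ha2⟩ := ha
        obtain ⟨rfl, hb2⟩ := hb
        show x :: ps <+: pvLcp (x :: as) (x :: bs)
        simp only [pvLcp]
        exact List.cons_prefix_cons.mpr ⟨rfl, ih _ _ ha2 hb2⟩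

theorem pvPrefix_antisymm {l m : List String} (h1 : l <+: m) (h2 : m <+: l) : l = m :=
  h1.eq_of_length (Nat.le_antisymm h1.length_le h2.length_le)

-- helper facts about A's loop primitives
theorem pvEnum_cons (c : String) (t : List String) (k : Int) :
    PySem.List.enumerate (c::t) k = (k,c) :: PySem.List.enumerate t (k+1) := by
  simp [PySem.List.enumerate]

theorem pvGetD_drop (smax : List String) (k : Nat) :
    PySem.List.pyGetD smax (k : Int) "" = ((smax.drop k).head?).getD "" := by
  rw [PySem.List.pyGetD_natCast, List.head?_drop, List.getD_eq_getElem?_getD]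

theorem pvSlice_take (smin : List String) (k : Nat) :
    PySem.List.slice smin none (some (k : Int)) = smin.take k := by
  rw [PySem.List.slice_to _ (by positivity), Int.toNat_natCast]

-- A's loop computes pvLcp when every component of s_min is nonempty
theorem pvGoA_aux (smin smax : List String) (hne : ∀ c ∈ smin, c ≠ "") :
    ∀ (rest : List String) (k : Nat), rest = smin.drop k →
      pvGoA smin smax (PySem.List.enumerate rest (k : Int)) = smin.take k ++ pvLcp rest (smax.drop k) := by
  intro rest
  induction rest with
  | nil =>
    intro k hk
    have hlen : smin.length ≤ k := List.drop_eq_nil_iff.mp hk.symm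
    have htk : smin.take k = smin := List.take_of_length_le hlen
    cases hsd : smax.drop k <;> simp [PySem.List.enumerate, pvGoA, pvLcp, htk]
  | cons c t ih =>
    intro k hk
    have hck : smin[k]? = some c := by rw [← List.head?_drop, ← hk]; rfl
    have hmem : c ∈ smin := List.mem_of_getElem? hck
    have ht : t = smin.drop (k + 1) := by rw [← List.tail_drop, ← hk]; rfl
    rw [pvEnum_cons]
    simp only [pvGoA]
    cases hsd : smax.drop k with
    | nil =>
      rw [if_pos (by rw [pvGetD_drop, hsd]; exact (by simpa using hne c hmem))]
      rw [pvSlice_take]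
      simp [pvLcp]
    | cons d ds =>
      have hget : PySem.List.pyGetD smax (k : Int) "" = d := by rw [pvGetD_drop, hsd]; rfl
      by_cases hcd : c = d
      · rw [if_neg (by rw [hget]; exact fun h => h hcd)]
        have harith : (k : Int) + 1 = ((k + 1 : Nat) : Int) := by push_cast; ring
        rw [harith, ih (k + 1) ht]
        have hdds : ds = smax.drop (k + 1) := by rw [← List.tail_drop, hsd]; rfl
        rw [← hdds]
        have htake : smin.take (k + 1) = smin.take k ++ [c] := by
          rw [List.take_add_one, hck]; rfl
        rw [htake]
        simp [pvLcp, hcd]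
      · rw [if_pos (by rw [hget]; exact fun h => hcd h)]
        rw [pvSlice_take]
        simp [pvLcp, hcd]

theorem pvGoA_eq_pvLcp (smin smax : List String) (hne : ∀ c ∈ smin, c ≠ "") :
    pvGoA smin smax (PySem.List.enumerate smin 0) = pvLcp smin smax := by
  have := pvGoA_aux smin smax hne smin 0 (by simp)
  simpa using this

-- s[:1] == [c] tests 'c is the head of s'
theorem pvTake_one_eq (s : List String) (c : String) :
    (PySem.List.slice s none (some 1) == [c]) = true ↔ ∃ t, s = c :: t := by
  rw [PySem.List.slice_to s (by norm_num), show (1 : Int).toNat = 1 from rfl]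
  cases s with
  | nil => simp
  | cons x t =>
    simp only [List.take_succ_cons, List.take_zero, beq_iff_eq, List.cons.injEq]
    aesop

-- B's loop: its result is a common prefix of the first path and of every other path …
theorem pvGoB_prefix : ∀ (first : List String) (rest : List (List String)),
    pvGoB first rest <+: first ∧ ∀ s ∈ rest, pvGoB first rest <+: s := by
  intro first
  induction first with
  | nil => intro rest; simp [pvGoB]
  | cons c t ih =>
    intro rest
    simp only [pvGoB]
    split
    · rename_i hall
      rw [List.all_eq_true] at hall
      obtain ⟨ih1, ih2⟩ := ih (rest.map (fun s => PySem.List.slice s (some 1) none))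
      refine ⟨List.cons_prefix_cons.mpr ⟨rfl, ih1⟩, ?_⟩
      intro s hs
      obtain ⟨ts, rfl⟩ := (pvTake_one_eq s c).mp (hall s hs)
      refine List.cons_prefix_cons.mpr ⟨rfl, ?_⟩
      have := ih2 (PySem.List.slice (c :: ts) (some 1) none) (List.mem_map_of_mem hs)
      rwa [PySem.List.slice_from _ (by norm_num), show (1 : Int).toNat = 1 from rfl,
           List.drop_succ_cons, List.drop_zero] at this
    · simp

-- … and any common prefix of all of them is a prefix of B's result
theorem prefix_pvGoB : ∀ (p first : List String) (rest : List (List String)),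
    p <+: first → (∀ s ∈ rest, p <+: s) → p <+: pvGoB first rest := by
  intro p
  induction p with
  | nil => simp
  | cons c ps ih =>
    intro first rest h1 h2
    cases first with
    | nil => simp at h1
    | cons d t =>
      rw [List.cons_prefix_cons] at h1
      obtain ⟨rfl, h1t⟩ := h1
      have hall : rest.all (fun s => PySem.List.slice s none (some 1) == [c]) = true := by
        rw [List.all_eq_true]
        intro s hs
        obtain ⟨ts, hts⟩ := h2 s hs
        cases s with
        | nil => simp at hts
        | cons y ys =>
          rw [List.cons_append] at hts
          injection hts with he1 he2
          exact (pvTake_one_eq _ c).mpr ⟨ys, by rw [he1]⟩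
      simp only [pvGoB, if_pos hall]
      refine List.cons_prefix_cons.mpr ⟨rfl, ih t _ h1t ?_⟩
      intro s hs
      rw [List.mem_map] at hs
      obtain ⟨s0, hs0, rfl⟩ := hs
      obtain ⟨ts, hts⟩ := h2 s0 hs0
      cases s0 with
      | nil => simp at hts
      | cons y ys =>
        rw [PySem.List.slice_from _ (by norm_num), show (1 : Int).toNat = 1 from rfl,
            List.drop_succ_cons, List.drop_zero]
        rw [List.cons_append] at hts
        injection hts with he1 he2
        exact ⟨ts, he2⟩

-- lexicographic sandwich: a common prefix of m and M is a prefix of anything between them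
theorem pvPrefix_sandwich : ∀ (p m M y : List String),
    p <+: m → p <+: M → m ≤ y → y ≤ M → p <+: y := by
  intro p
  induction p with
  | nil => simp
  | cons c ps ih =>
    intro m M y hm hM hmy hyM
    cases m with
    | nil => simp at hm
    | cons a ms =>
      cases M with
      | nil => simp at hM
      | cons b Ms =>
        rw [List.cons_prefix_cons] at hm hM
        obtain ⟨rfl, hm2⟩ := hm
        obtain ⟨hb, hM2⟩ := hM
        subst hb
        rcases hmy.lt_or_eq with h1 | rfl
        · have h1' : List.Lex (· < ·) (c :: ms) y := h1
          cases h1' with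
          | cons h1t =>
            rename_i ys
            rcases hyM.lt_or_eq with h2 | heq
            · have h2' : List.Lex (· < ·) (c :: ys) (c :: Ms) := h2
              cases h2' with
              | cons h2t => exact List.cons_prefix_cons.mpr ⟨rfl, ih _ _ _ hm2 hM2 (le_of_lt h1t) (le_of_lt h2t)⟩
              | rel h2r => exact absurd h2r (lt_irrefl _)
            · injection heq with he1 he2; subst he2
              exact List.cons_prefix_cons.mpr ⟨rfl, ih _ _ _ hm2 hM2 (le_of_lt h1t) le_rfl⟩
          | rel h1r =>
            rename_i d ys
            rcases hyM.lt_or_eq with h2 | heq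
            · have h2' : List.Lex (· < ·) (d :: ys) (c :: Ms) := h2
              cases h2' with
              | cons h2t => exact List.cons_prefix_cons.mpr ⟨rfl, (absurd h1r (lt_irrefl _))⟩
              | rel h2r => exact absurd (h1r.trans h2r) (lt_irrefl _)
            · injection heq with he1 he2; subst he1; exact absurd h1r (lt_irrefl _)
        · exact List.cons_prefix_cons.mpr ⟨rfl, hm2⟩

-- p[:1] == '/'  is  p.startswith('/')
theorem pvSliceOne_eq_startswith (p : String) :
    (PySem.Str.slice p none (some 1) == "/") = PySem.Str.startswith p "/" := by
  rw [Bool.eq_iff_iff, beq_iff_eq, PySem.Str.startswith_eq, PySem.Chars.startswith_iff,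
      ← String.toList_inj, PySem.Str.toList_slice]
  show PySem.List.slice p.toList none (some 1) = "/".toList ↔ _
  rw [PySem.List.slice_to _ (by norm_num), show (1:Int).toNat = 1 from rfl,
      show "/".toList = ['/'] from rfl]
  cases p.toList with
  | nil => simp
  | cons x t => simp [List.take_succ_cons, List.cons_prefix_cons, eq_comm]

theorem pvFoldAdd_const (b : Bool) : ∀ (t : List Bool), (∀ x ∈ t, x = b) →
    t.foldl PySem.Set.add [b] = [b] := by
  intro t
  induction t with
  | nil => intro _; rfl
  | cons x t ih =>
    intro h
    have hx : x = b := h x (by simp)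
    subst hx
    have : PySem.Set.add [x] x = [x] := by simp [PySem.Set.add]
    rw [List.foldl_cons, this]
    exact ih fun y hy => h y (by simp [hy])

theorem pvSetOfList_const (l : List Bool) (b : Bool) (hne : l ≠ []) (h : ∀ x ∈ l, x = b) :
    PySem.Set.ofList l = [b] := by
  cases l with
  | nil => exact absurd rfl hne
  | cons x t =>
    have hx : x = b := h x (by simp)
    subst hx
    rw [PySem.Set.ofList_eq_foldl, List.foldl_cons]
    have : PySem.Set.add [] x = [x] := by simp [PySem.Set.add]
    rw [this]
    exact pvFoldAdd_const x t fun y hy => h y (by simp [hy])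

-- ===== VERDICT (by name: the statement is the Claim_ definition above) =====
theorem posix_commonpath_spec : Claim_equal_posix_commonpath := by
  intro paths _ hpre
  obtain ⟨hne, hdisj⟩ := hpre
  obtain ⟨p0, ps, rfl⟩ : ∃ p0 ps, paths = p0 :: ps := by
    cases paths with
    | nil => exact absurd rfl hne
    | cons p0 ps => exact ⟨p0, ps, rfl⟩
  set b := PySem.Str.startswith p0 "/" with hbdef
  have hsame : ∀ p ∈ p0 :: ps, PySem.Str.startswith p "/" = b := by
    rcases hdisj with h | h
    · intro p hp; rw [h p hp, hbdef, h p0 (by simp)]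
    · intro p hp; rw [h p hp, hbdef, h p0 (by simp)]
  -- the filtered split paths
  set f : String → List String :=
    fun p => ((PySem.Str.split? p "/").getD []).filter (fun c => !(c == "") && !(c == ".")) with hfdef
  set sp : List (List String) := (p0 :: ps).map f with hspdef
  -- every component of every filtered path is nonempty
  have hcomp : ∀ l ∈ sp, ∀ c ∈ l, c ≠ "" := by
    intro l hl c hc
    rw [hspdef, List.mem_map] at hl
    obtain ⟨p, _, rfl⟩ := hl
    rw [hfdef] at hc
    simp only [List.mem_filter, Bool.and_eq_true, Bool.not_eq_eq_eq_not, Bool.not_true,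
      beq_eq_false_iff_ne, ne_eq] at hc
    exact hc.2.1
  -- min and max exist
  obtain ⟨smin, hmin⟩ : ∃ m, @PySem.List.min? _ _ List.instLinearOrder.toLT LinearOrder.toDecidableLT sp (fun x => x) = some m := by
    cases h : @PySem.List.min? _ _ List.instLinearOrder.toLT LinearOrder.toDecidableLT sp (fun x => x) with
    | none => rw [@PySem.List.min?_eq_none_iff _ _ List.instLinearOrder.toLT LinearOrder.toDecidableLT] at h; simp [hspdef] at h
    | some m => exact ⟨m, rfl⟩
  obtain ⟨smax, hmax⟩ : ∃ m, @PySem.List.max? _ _ List.instLinearOrder.toLT LinearOrder.toDecidableLT sp (fun x => x) = some m := by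
    cases h : @PySem.List.max? _ _ List.instLinearOrder.toLT LinearOrder.toDecidableLT sp (fun x => x) with
    | none => rw [@PySem.List.max?_eq_none_iff _ _ List.instLinearOrder.toLT LinearOrder.toDecidableLT] at h; simp [hspdef] at h
    | some m => exact ⟨m, rfl⟩
  -- evaluate port A
  have hflags : PySem.Set.ofList ((p0 :: ps).map (fun p => PySem.Str.slice p none (some 1) == "/")) = [b] := by
    apply pvSetOfList_const _ b (by simp)
    intro x hx
    rw [List.mem_map] at hx
    obtain ⟨p, hp, rfl⟩ := hx
    rw [pvSliceOne_eq_startswith, hsame p hp]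
  have hA : posix_commonpath (p0 :: ps) =
      (if b then "/" else "") ++ PySem.Str.join "/" (pvGoA smin smax (PySem.List.enumerate smin 0)) := by
    unfold posix_commonpath
    rw [if_neg (by simp)]
    simp only [hflags]
    have hmm : (List.map (fun s => List.filter (fun c => !c == "" && !c == ".") s)
        (List.map (fun p => (PySem.Str.split? p "/").getD []) (p0 :: ps))) = sp := by
      rw [List.map_map]; rfl
    rw [hmm, hmin, hmax]
  -- evaluate port B
  have hB : posix_commonpath_alt (p0 :: ps) =
      (if b then "/" else "") ++ PySem.Str.join "/" (pvGoB (f p0) (ps.map f)) := by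
    unfold posix_commonpath_alt
    have hany : ((p0 :: ps).any fun p => PySem.Str.startswith p "/" != PySem.Str.startswith p0 "/") = false := by
      rw [List.any_eq_false]
      intro p hp
      rw [hsame p hp, hbdef]
      simp
    simp only [List.map_cons, hany, Bool.false_eq_true, if_false]
    rfl
  -- the two common-prefix computations agree
  have hsp : sp = f p0 :: ps.map f := by rw [hspdef]; rfl
  have hminmem : smin ∈ sp := @PySem.List.min?_mem _ _ List.instLinearOrder.toLT LinearOrder.toDecidableLT _ _ _ hmin
  have hmaxmem : smax ∈ sp := @PySem.List.max?_mem _ _ List.instLinearOrder.toLT LinearOrder.toDecidableLT _ _ _ hmax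
  have hloop : pvGoA smin smax (PySem.List.enumerate smin 0) = pvGoB (f p0) (ps.map f) := by
    rw [pvGoA_eq_pvLcp smin smax (hcomp smin hminmem)]
    apply pvPrefix_antisymm
    · -- pvLcp smin smax is a common prefix of everything in sp
      have hcp : ∀ y ∈ sp, pvLcp smin smax <+: y := by
        intro y hy
        have hy1 : smin ≤ y := PySem.List.min?_isMin (key := fun x => x) hmin y hy
        have hy2 : y ≤ smax := PySem.List.max?_isMax (key := fun x => x) hmax y hy
        exact pvPrefix_sandwich _ _ _ _ (pvLcp_prefix_left smin smax) (pvLcp_prefix_right smin smax) hy1 hy2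
      exact prefix_pvGoB _ _ _ (hcp (f p0) (by rw [hsp]; simp))
        (fun s hs => hcp s (by rw [hsp]; simp [hs]))
    · -- pvGoB's result is a common prefix of smin and smax
      obtain ⟨hg1, hg2⟩ := pvGoB_prefix (f p0) (ps.map f)
      have hany : ∀ y ∈ sp, pvGoB (f p0) (ps.map f) <+: y := by
        intro y hy
        rw [hsp] at hy
        rcases List.mem_cons.mp hy with rfl | hy'
        · exact hg1
        · exact hg2 y hy'
      exact prefix_pvLcp _ _ _ (hany smin hminmem) (hany smax hmaxmem)
  rw [Spec_posix_commonpath, hA, hB, hloop]
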